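-- pv_equiv track=rewrite | github.com/curatechmanager/Yanez-MIID | neurons/main/name/rule_based_generator.py | remove_title
-- ===== SOURCE A (Python) =====
-- def remove_title(name: str) -> str:
--     """
--     Validator check: is_title_removed
--     - Must start with a title followed by space
--     - Variation is name without the title
--     """
--     titles = ["Mr.", "Mrs.", "Ms.", "Mr", "Mrs", "Ms", "Miss", "Dr.", "Dr",
--               "Prof.", "Prof", "Sir", "Lady", "Lord", "Dame", "Master",
--               "Rev.", "Hon.", "Capt.", "Col.", "Lt.", "Sgt.", "Maj."]
--
--     name_lower = name.lower()
--     for title in titles: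
--         if name_lower.startswith(title.lower() + " "):
--             return name[len(title)+1:]
--
--     return name
-- ===== SOURCE B (Python) =====
-- _TITLES = {"mr.", "mrs.", "ms.", "mr", "mrs", "ms", "miss", "dr.", "dr",
--            "prof.", "prof", "sir", "lady", "lord", "dame", "master",
--            "rev.", "hon.", "capt.", "col.", "lt.", "sgt.", "maj."}
--
--
-- def remove_title(name: str) -> str:
--     first, sep, rest = name.partition(' ')
--     if sep and first.lower() in _TITLES:
--         return rest
--     return name
-- ===== Notes on version B (the rewrite author's own statement) =====
-- stated objective: idiomatic
-- what changed: Instead of scanning all 23 titles with startswith against the lowered name, B splits off the first space-delimited token once with str.partition and does a single membership lookup of its lowercase form in a precomputed set of lowercase titles.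
import Mathlib
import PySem

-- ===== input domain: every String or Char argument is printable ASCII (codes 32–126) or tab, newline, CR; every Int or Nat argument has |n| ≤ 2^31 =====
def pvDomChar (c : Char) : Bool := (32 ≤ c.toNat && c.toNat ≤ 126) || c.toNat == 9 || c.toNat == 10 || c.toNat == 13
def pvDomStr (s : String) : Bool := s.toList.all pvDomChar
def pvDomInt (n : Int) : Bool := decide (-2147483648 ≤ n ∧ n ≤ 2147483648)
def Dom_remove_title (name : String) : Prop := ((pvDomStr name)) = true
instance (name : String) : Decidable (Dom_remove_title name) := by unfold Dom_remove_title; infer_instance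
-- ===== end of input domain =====

-- B replaces the linear scan over 23 startswith checks by one partition of the first
-- space-delimited token and a single set lookup of its lowercase form (idiomatic rewrite).

-- ===== PORT A =====
def pvTitles : List String :=
  ["Mr.", "Mrs.", "Ms.", "Mr", "Mrs", "Ms", "Miss", "Dr.", "Dr",
   "Prof.", "Prof", "Sir", "Lady", "Lord", "Dame", "Master",
   "Rev.", "Hon.", "Capt.", "Col.", "Lt.", "Sgt.", "Maj."]

-- the 'for title in titles' loop: first matching title returns, else fall through
def removeTitleLoop (name name_lower : String) : List String → String
  | [] => name
  | title :: ts =>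
    if PySem.Str.startswith name_lower (PySem.Str.lower title ++ " ") then
      PySem.Str.slice name (some (PySem.Str.len title + 1)) none
    else removeTitleLoop name name_lower ts

def remove_title (name : String) : String :=
  let name_lower := PySem.Str.lower name
  removeTitleLoop name name_lower pvTitles

-- ===== PORT B =====
def pvTitleSet : PySem.Set String :=
  PySem.Set.ofList
    ["mr.", "mrs.", "ms.", "mr", "mrs", "ms", "miss", "dr.", "dr",
     "prof.", "prof", "sir", "lady", "lord", "dame", "master",
     "rev.", "hon.", "capt.", "col.", "lt.", "sgt.", "maj."]

-- hand port of str.partition(' ') (not in PySem): exact — splits at the first space code point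
def pyPartitionSpace (s : String) : String × String × String :=
  let l := s.toList
  let first := l.takeWhile (fun c => c ≠ ' ')
  if first.length = l.length then (s, "", "")
  else (String.ofList first, " ", String.ofList (l.drop (first.length + 1)))

def remove_title_alt (name : String) : String :=
  let p := pyPartitionSpace name
  if p.2.1 ≠ "" ∧ PySem.Set.contains pvTitleSet (PySem.Str.lower p.1) = true then p.2.2
  else name

-- ===== PRECONDITION & SPEC =====
def Spec_remove_title (name : String) (out : String) : Prop := out = remove_title_alt name
instance (name : String) (out : String) : Decidable (Spec_remove_title name out) := by unfold Spec_remove_title; infer_instance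

-- ===== CLAIM (what is proved, stated in full; the proofs are below) =====
def Claim_equal_remove_title : Prop := ∀ (name : String), Dom_remove_title name → Spec_remove_title name (remove_title name)

-- ===== LEMMAS AND PROOFS =====

-- lowering a character never produces a space from a non-space
theorem lowerChar_eq_space {c : Char} (h : PySem.Chars.lowerChar c = ' ') : c = ' ' := by
  unfold PySem.Chars.lowerChar PySem.Chars.isupper at h
  split at h
  · next hu =>
    exfalso
    simp only [Bool.and_eq_true, decide_eq_true_eq, Char.le_def, UInt32.le_iff_toNat_le] at hu
    have hc : 65 ≤ c.toNat ∧ c.toNat ≤ 90 := by unfold Char.toNat; exact hu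
    have hval : (c.toNat + 32).isValidChar := by left; omega
    have h2 := congrArg Char.toNat h
    rw [Char.toNat_ofNat, if_pos hval] at h2
    have hsp : (' ' : Char).toNat = 32 := rfl
    omega
  · exact h

theorem space_mem_lower {l : List Char} (h : ' ' ∈ PySem.Chars.lower l) : ' ' ∈ l := by
  unfold PySem.Chars.lower at h
  obtain ⟨c, hc, he⟩ := List.mem_map.mp h
  exact (lowerChar_eq_space he) ▸ hc

theorem space_not_mem_lower {l : List Char} (h : ' ' ∉ l) : ' ' ∉ PySem.Chars.lower l :=
  fun hm => h (space_mem_lower hm)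

-- a ++ [' '] is a prefix of b ++ ' ' :: c  iff  a = b, when neither a nor b contains a space
theorem prefix_space {a b : List Char} (c : List Char) (ha : ' ' ∉ a) (hb : ' ' ∉ b) :
    (a ++ [' ']) <+: (b ++ ' ' :: c) ↔ a = b := by
  constructor
  · intro h
    induction a generalizing b with
    | nil =>
      cases b with
      | nil => rfl
      | cons y b' =>
        exfalso
        obtain ⟨t, ht⟩ := h
        have : (' ' : Char) = y := by
          have := congrArg (fun l => l[0]?) ht
          simpa using this
        exact hb (this ▸ List.mem_cons_self)
    | cons x a' ih =>
      cases b with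
      | nil =>
        exfalso
        obtain ⟨t, ht⟩ := h
        have : x = ' ' := by
          have := congrArg (fun l => l[0]?) ht
          simpa using this
        exact ha (this ▸ List.mem_cons_self)
      | cons y b' =>
        obtain ⟨t, ht⟩ := h
        simp only [List.cons_append, List.cons.injEq] at ht
        obtain ⟨hxy, htail⟩ := ht
        have := ih (fun hm => ha (List.mem_cons_of_mem _ hm))
          (fun hm => hb (List.mem_cons_of_mem _ hm)) ⟨t, htail⟩
        rw [hxy, this]
  · rintro rfl
    exact ⟨c, by simp⟩

-- no title (lowered) contains a space
theorem titles_no_space : ∀ t ∈ pvTitles, ' ' ∉ (PySem.Str.lower t).toList := by decide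

-- the loop returns the name unchanged when the name contains no space
theorem loop_nospace (name : String) (hsp : ' ' ∉ name.toList) (ts : List String)
    (hts : ∀ t ∈ ts, ' ' ∉ (PySem.Str.lower t).toList) :
    removeTitleLoop name (PySem.Str.lower name) ts = name := by
  induction ts with
  | nil => rfl
  | cons t ts ih =>
    unfold removeTitleLoop
    rw [if_neg, ih (fun u hu => hts u (List.mem_cons_of_mem _ hu))]
    intro hc
    rw [PySem.Str.startswith_eq] at hc
    have hpre := (PySem.Chars.startswith_iff _ _).mp hc
    have hm : (' ' : Char) ∈ (PySem.Str.lower name).toList :=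
      hpre.subset (by simp)
    rw [PySem.Str.toList_lower] at hm
    exact hsp (space_mem_lower hm)

-- the loop, on a name of shape f ++ ' ' :: r (f space-free), is a membership test of lower f
theorem loop_split (name : String) (f r : List Char) (hf : ' ' ∉ f)
    (hl : name.toList = f ++ ' ' :: r) (ts : List String)
    (hts : ∀ t ∈ ts, ' ' ∉ (PySem.Str.lower t).toList) :
    removeTitleLoop name (PySem.Str.lower name) ts =
      if (PySem.Chars.lower f) ∈ ts.map (fun t => (PySem.Str.lower t).toList)
      then String.ofList r else name := by
  induction ts with
  | nil => simp [removeTitleLoop]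
  | cons t ts ih =>
    have hnl : (PySem.Str.lower name).toList =
        PySem.Chars.lower f ++ ' ' :: PySem.Chars.lower r := by
      rw [PySem.Str.toList_lower, hl]
      simp [PySem.Chars.lower, PySem.Chars.lowerChar, PySem.Chars.isupper]
    have hcond : PySem.Str.startswith (PySem.Str.lower name) (PySem.Str.lower t ++ " ") = true
        ↔ (PySem.Str.lower t).toList = PySem.Chars.lower f := by
      rw [PySem.Str.startswith_eq, PySem.Chars.startswith_iff]
      rw [hnl]
      have : (PySem.Str.lower t ++ " ").toList = (PySem.Str.lower t).toList ++ [' '] := by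
        simp
      rw [this]
      exact prefix_space _ (hts t List.mem_cons_self) (space_not_mem_lower hf)
    unfold removeTitleLoop
    by_cases hc : (PySem.Str.lower t).toList = PySem.Chars.lower f
    · rw [if_pos (hcond.mpr hc), if_pos (List.mem_map.mpr ⟨t, List.mem_cons_self, hc⟩)]
      -- the matching title has the same length as f
      have hlen : t.toList.length = f.length := by
        have h1 := congrArg List.length hc
        simp [PySem.Str.toList_lower, PySem.Chars.lower] at h1
        exact h1
      unfold PySem.Str.slice
      rw [PySem.Str.len_eq]
      have : ((t.toList.length : Int) + 1) = ((t.toList.length + 1 : Nat) : Int) := by push_cast; ring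
      rw [this, PySem.Chars.slice_eq_listSlice, PySem.List.slice_from_natCast, hl, hlen]
      congr 1
      simp
    · rw [if_neg (fun h => hc (hcond.mp h)),
        ih (fun u hu => hts u (List.mem_cons_of_mem _ hu))]
      simp only [List.map_cons, List.mem_cons]
      congr 1
      simp only [eq_iff_iff]
      constructor
      · exact Or.inr
      · rintro (h | h)
        · exact absurd h.symm hc
        · exact h

-- membership of lower f in the mapped lowered titles equals B's set lookup
theorem mem_titles_iff (f : List Char) :
    (PySem.Chars.lower f) ∈ pvTitles.map (fun t => (PySem.Str.lower t).toList)
      ↔ PySem.Set.contains pvTitleSet (String.ofList (PySem.Chars.lower f)) = true := by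
  rw [PySem.Set.contains_iff]
  have hmap : pvTitles.map (fun t => (PySem.Str.lower t).toList)
      = (["mr.", "mrs.", "ms.", "mr", "mrs", "ms", "miss", "dr.", "dr",
          "prof.", "prof", "sir", "lady", "lord", "dame", "master",
          "rev.", "hon.", "capt.", "col.", "lt.", "sgt.", "maj."] : List String).map
          String.toList := by decide
  rw [hmap]
  unfold pvTitleSet
  rw [PySem.Set.mem_ofList]
  constructor
  · intro h
    obtain ⟨t, ht, he⟩ := List.mem_map.mp h
    have h2 : String.ofList (PySem.Chars.lower f) = t := by
      rw [← he, String.ofList_toList]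
    exact h2 ▸ ht
  · intro h
    exact List.mem_map.mpr ⟨String.ofList (PySem.Chars.lower f), h, by simp⟩

theorem lower_ofList (f : List Char) :
    PySem.Str.lower (String.ofList f) = String.ofList (PySem.Chars.lower f) := by
  apply String.toList_injective
  rw [PySem.Str.toList_lower]
  simp

-- ===== VERDICT (by name: the statement is the Claim_ definition above) =====
theorem remove_title_spec : Claim_equal_remove_title := by
  intro name _
  unfold Spec_remove_title remove_title remove_title_alt pyPartitionSpace
  by_cases hsp : ' ' ∈ name.toList
  · -- the name contains a space: l = f ++ ' ' :: r
    set l := name.toList with hl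
    set f := l.takeWhile (fun c => c ≠ ' ') with hfdef
    have hf : ' ' ∉ f := by
      intro hm
      have := List.mem_takeWhile_imp hm
      simp at this
    have hdrop : l.dropWhile (fun c => c ≠ ' ') ≠ [] := by
      intro h
      have h2 := List.dropWhile_eq_nil_iff.mp h ' ' hsp
      simp at h2
    obtain ⟨d, r, hdr⟩ := List.exists_cons_of_ne_nil hdrop
    have hdsp : d = ' ' := by
      have h3 := List.head_dropWhile_not (p := fun c => decide (c ≠ ' ')) (l := l) hdrop
      have h5 : (List.dropWhile (fun c => decide (c ≠ ' ')) l).head? = some d := by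
        rw [hdr]; rfl
      rw [List.head?_eq_some_head hdrop] at h5
      rw [Option.some.inj h5] at h3
      simpa using h3
    have hsplit : l = f ++ ' ' :: r := by
      conv_lhs => rw [← List.takeWhile_append_dropWhile (p := fun c => c ≠ ' ') (l := l)]
      rw [hdr, hdsp]
    have hflen : f.length ≠ l.length := by
      intro h
      have h2 := congrArg List.length hsplit
      simp only [List.length_append, List.length_cons] at h2
      omega
    rw [loop_split name f r hf hsplit pvTitles titles_no_space]
    rw [if_neg hflen]
    simp only [← hfdef]
    have hdropeq : l.drop (f.length + 1) = r := by rw [hsplit]; simp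
    by_cases hmem : (PySem.Chars.lower f) ∈ pvTitles.map (fun t => (PySem.Str.lower t).toList)
    · rw [if_pos hmem, if_pos, hdropeq]
      refine ⟨by simp, ?_⟩
      rw [lower_ofList]
      exact (mem_titles_iff f).mp hmem
    · rw [if_neg hmem, if_neg]
      intro ⟨_, hc⟩
      rw [lower_ofList] at hc
      exact hmem ((mem_titles_iff f).mpr hc)
  · -- no space: both sides return the name unchanged
    rw [loop_nospace name hsp pvTitles titles_no_space]
    have htake : (name.toList.takeWhile (fun c => c ≠ ' ')).length = name.toList.length := by
      congr 1
      apply List.takeWhile_eq_self_iff.mpr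
      intro c hc
      simp only [ne_eq, decide_eq_true_eq]
      exact fun h => hsp (h ▸ hc)
    rw [if_pos htake]
    simp
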